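-- pv_equiv track=rewrite | github.com/ASTRAL-Group/LoRe | LoRe-Bench/LoRe-Mono/scripts/lang-8-mirror-pointer-fixer.py | run_pointer_machine
-- ===== SOURCE A (Python) =====
-- def first_unmatched_pair(word, mirror):
--     """
--     Return (i, j) indices (0-based) of the first pair from the left that doesn't mirror-match.
--     If all pairs are matched, return None.
--     """
--     m = len(word)
--     for i in range(m):
--         j = m - 1 - i
--         if word[i] != mirror.get(word[j], word[j]):
--             return i, j
--     return None
--
-- def run_pointer_machine(w0: str, steps: int, mirror: dict) -> str:
--     """
--     Run exactly `steps` edits of the pointer-based mirror repair machine,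
--     starting with L=1, R=len(w0) (user-facing 1-based; internally 0-based).
--     """
--     w = list(w0)
--     m = len(w)
--
--     # 0-based cursors (but the TASK TEXT will specify cursors are 1-based)
--     L = 0
--     R = m - 1
--
--     for _ in range(steps):
--         left = w[L]
--         right = w[R]
--         # If not a mirror-match: overwrite the right with mirror(left)
--         if left != mirror.get(right, right):
--             w[R] = mirror.get(left, left)
--         else:
--             # If mirror-match: overwrite the left with mirror(right) (usually no visible change)
--             w[L] = mirror.get(right, right)
--
--         # Move the cursors inward
--         L += 1
--         R -= 1
--
--         # Finished a sweep? Wrap to the first still-unmatched pair (if any)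
--         if L > R:
--             um = first_unmatched_pair(w, mirror)
--             if um is None:
--                 # Everything already mirror-matches; resetting is fine—further edits won’t change the word
--                 L, R = 0, m - 1
--             else:
--                 L, R = um
--
--     return "".join(w)
-- ===== SOURCE B (Python) =====
-- def run_pointer_machine(w0: str, steps: int, mirror: dict) -> str:
--     m = len(w0)
--
--     def mget(c):
--         return mirror.get(c, c)
--
--     def step_once(w, L, R):
--         # one edit of the machine, mutating w in place; reports whether w changed
--         # (the matched branch of the machine rewrites w[L] with its own value: a no-op)
--         changed = False
--         if w[L] != mget(w[R]):
--             v = mget(w[L])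
--             if w[R] != v:
--                 w[R] = v
--                 changed = True
--         L += 1
--         R -= 1
--         if L > R:
--             i = 0
--             while i < len(w):
--                 if w[i] != mget(w[len(w) - 1 - i]):
--                     break
--                 i += 1
--             if i == len(w):
--                 L, R = 0, m - 1
--             else:
--                 L, R = i, len(w) - 1 - i
--         return L, R, changed
--
--     # Brent-style cycle detection on the machine state (w, L, R): `(sL, sR)` are the
--     # cursors at checkpoint time `ts` (checkpoints at doubling distances), `lastmod` the
--     # last time w actually changed.  Cursors equal to the checkpoint's with no word change
--     # since `ts` means the full state repeated: skip the remaining steps modulo the period.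
--     w = list(w0)
--     L, R = 0, m - 1
--     sL, sR, ts, limit = L, R, 0, 1
--     lastmod = 0
--     k = 0
--     while k < steps:
--         L, R, changed = step_once(w, L, R)
--         k += 1
--         if changed:
--             lastmod = k
--         if L == sL and R == sR and lastmod <= ts:
--             period = k - ts
--             r = (steps - ts) % period
--             L, R = sL, sR
--             for _ in range(r):
--                 L, R, _ = step_once(w, L, R)
--             return "".join(w)
--         if k - ts == limit:
--             sL, sR, ts, limit = L, R, k, 2 * limit
--     return "".join(w)
-- ===== Notes on version B (the rewrite author's own statement) =====
-- stated objective: alternative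
-- what changed: B replaces A's step-by-step simulation of all `steps` edits by Brent-style cycle detection on the machine state (word, cursors, with a last-modification timestamp so state comparison is O(1)): once the state is seen to repeat, the remaining steps are taken modulo the cycle period, so huge step counts whose trajectory cycles are short-circuited; on trajectories where no repeat is detected the cost matches A's.
import Mathlib
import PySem

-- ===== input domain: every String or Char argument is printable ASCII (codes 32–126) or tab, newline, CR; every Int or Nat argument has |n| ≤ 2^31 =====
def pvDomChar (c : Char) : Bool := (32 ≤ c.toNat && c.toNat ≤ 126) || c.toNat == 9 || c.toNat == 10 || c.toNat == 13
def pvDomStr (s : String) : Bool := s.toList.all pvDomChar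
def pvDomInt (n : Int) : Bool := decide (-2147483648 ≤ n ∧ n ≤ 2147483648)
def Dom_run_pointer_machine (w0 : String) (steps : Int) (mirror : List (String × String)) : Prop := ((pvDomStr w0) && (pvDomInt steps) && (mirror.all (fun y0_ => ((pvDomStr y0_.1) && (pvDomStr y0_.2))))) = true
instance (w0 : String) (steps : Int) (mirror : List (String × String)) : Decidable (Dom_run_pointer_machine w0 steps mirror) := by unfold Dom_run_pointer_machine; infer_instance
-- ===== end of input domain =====

-- B replaces A's step-by-step simulation of all `steps` edits by Brent-style cycle
-- detection on the machine state: once the state is seen to repeat, the remaining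
-- steps are taken modulo the cycle period (an alternative algorithm; measured cost
-- on non-cycling inputs is comparable to A's).

-- ===== PORT A =====
-- mirror.get(c, c)
def pvMget (mirror : List (String × String)) (c : String) : String :=
  ((PySem.Dict.mk mirror).get? c).getD c

-- first_unmatched_pair(word, mirror), the `for i in range(m)` loop from position i
def pvFirstUnmatched (word : List String) (mirror : List (String × String)) (i : Nat) :
    Option (Int × Int) :=
  if h : i < word.length then
    let j : Int := (word.length : Int) - 1 - (i : Int)
    if (PySem.List.pyGetD word (i : Int) "") ≠ pvMget mirror (PySem.List.pyGetD word j "") then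
      some ((i : Int), j)
    else pvFirstUnmatched word mirror (i + 1)
  else none
  termination_by word.length - i

-- the `for _ in range(steps)` loop of A, state (w, L, R)
def pvALoop (mirror : List (String × String)) (m : Int) :
    Nat → List String → Int → Int → List String
  | 0, w, _, _ => w
  | n + 1, w, L, R =>
    let left := PySem.List.pyGetD w L ""
    let right := PySem.List.pyGetD w R ""
    let w' := if left ≠ pvMget mirror right
      then PySem.List.pySetD w R (pvMget mirror left)
      else PySem.List.pySetD w L (pvMget mirror right)
    let L' := L + 1
    let R' := R - 1
    if L' > R' then
      match pvFirstUnmatched w' mirror 0 with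
      | none => pvALoop mirror m n w' 0 (m - 1)
      | some (i, j) => pvALoop mirror m n w' i j
    else pvALoop mirror m n w' L' R'

def run_pointer_machine (w0 : String) (steps : Int) (mirror : List (String × String)) : String :=
  let w := w0.toList.map (fun c => String.ofList [c])
  let m : Int := (w.length : Int)
  PySem.Str.join "" (pvALoop mirror m steps.toNat w 0 (m - 1))

-- ===== PORT B =====
-- B's `while i < len(w)` scan for the first unmatched pair (returns len(w) if none)
def pvBScan (mirror : List (String × String)) (lst : List String) (i : Nat) : Nat :=
  if h : i < lst.length then
    if (PySem.List.pyGetD lst (i : Int) "") ≠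
        pvMget mirror (PySem.List.pyGetD lst ((lst.length : Int) - 1 - (i : Int)) "") then i
    else pvBScan mirror lst (i + 1)
  else i
  termination_by lst.length - i

-- B's step_once(w, L, R): one edit; returns (w, L, R, changed)
def pvBEdit (mirror : List (String × String)) (m : Int) (w : List String) (L R : Int) :
    List String × Int × Int × Bool :=
  let wc : List String × Bool :=
    if (PySem.List.pyGetD w L "") ≠ pvMget mirror (PySem.List.pyGetD w R "") then
      let v := pvMget mirror (PySem.List.pyGetD w L "")
      if (PySem.List.pyGetD w R "") ≠ v then (PySem.List.pySetD w R v, true)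
      else (w, false)
    else (w, false)
  let L' := L + 1
  let R' := R - 1
  let c : Int × Int :=
    if L' > R' then
      let i := pvBScan mirror wc.1 0
      if i = wc.1.length then ((0 : Int), m - 1)
      else ((i : Int), (wc.1.length : Int) - 1 - (i : Int))
    else (L', R')
  (wc.1, c.1, c.2, wc.2)

-- B's `for _ in range(r)` replay after the cycle is found
def pvBReplay (mirror : List (String × String)) (m : Int) :
    Nat → List String → Int → Int → List String
  | 0, w, _, _ => w
  | r + 1, w, L, R =>
    let e := pvBEdit mirror m w L R
    pvBReplay mirror m r e.1 e.2.1 e.2.2.1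

-- B's `while k < steps` loop with the Brent checkpoint (sL, sR, ts, limit, lastmod)
def pvBLoop (mirror : List (String × String)) (m steps : Int) :
    Nat → Int → List String → Int → Int → Int → Int → Int → Int → Int → String
  | 0, _, w, _, _, _, _, _, _, _ => PySem.Str.join "" w
  | fuel + 1, k, w, L, R, sL, sR, ts, limit, lastmod =>
    let e := pvBEdit mirror m w L R
    let k' := k + 1
    let lastmod' := if e.2.2.2 then k' else lastmod
    if e.2.1 = sL ∧ e.2.2.1 = sR ∧ lastmod' ≤ ts then
      let period := k' - ts
      let r := PySem.Int.mod (steps - ts) period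
      PySem.Str.join "" (pvBReplay mirror m r.toNat e.1 sL sR)
    else if k' - ts = limit then
      pvBLoop mirror m steps fuel k' e.1 e.2.1 e.2.2.1 e.2.1 e.2.2.1 k' (2 * limit) lastmod'
    else
      pvBLoop mirror m steps fuel k' e.1 e.2.1 e.2.2.1 sL sR ts limit lastmod'

def run_pointer_machine_alt (w0 : String) (steps : Int) (mirror : List (String × String)) : String :=
  let w := w0.toList.map (fun c => String.ofList [c])
  let m : Int := (w.length : Int)
  pvBLoop mirror m steps steps.toNat 0 w 0 (m - 1) 0 (m - 1) 0 1 0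

-- ===== PRECONDITION & SPEC =====
-- Pre_ excludes only the inputs where A raises IndexError: an empty word with steps > 0
-- (A reads w[0] of an empty list there; B raises as well).
def Pre_run_pointer_machine (w0 : String) (steps : Int) (mirror : List (String × String)) : Prop :=
  w0.toList ≠ [] ∨ steps ≤ 0

instance (w0 : String) (steps : Int) (mirror : List (String × String)) : Decidable (Pre_run_pointer_machine w0 steps mirror) := by unfold Pre_run_pointer_machine; infer_instance

def pvWitness_run_pointer_machine : String × Int × (List (String × String)) :=
  ("ab", 3, [("a", "b")])

def Spec_run_pointer_machine (w0 : String) (steps : Int) (mirror : List (String × String)) (out : String) : Prop := out = run_pointer_machine_alt w0 steps mirror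
instance (w0 : String) (steps : Int) (mirror : List (String × String)) (out : String) : Decidable (Spec_run_pointer_machine w0 steps mirror out) := by unfold Spec_run_pointer_machine; infer_instance

-- ===== CLAIM (what is proved, stated in full; the proofs are below) =====
def Claim_equal_run_pointer_machine : Prop := ∀ (w0 : String) (steps : Int) (mirror : List (String × String)), Dom_run_pointer_machine w0 steps mirror → Pre_run_pointer_machine w0 steps mirror → Spec_run_pointer_machine w0 steps mirror (run_pointer_machine w0 steps mirror)

-- ===== LEMMAS AND PROOFS =====

-- proof-side step function: the machine's transition on the state (w, L, R)
def pvStepF (mirror : List (String × String)) (m : Int) (st : List String × Int × Int) :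
    List String × Int × Int :=
  let (w, L, R) := st
  let w' := if (PySem.List.pyGetD w L "") ≠ pvMget mirror (PySem.List.pyGetD w R "")
    then PySem.List.pySetD w R (pvMget mirror (PySem.List.pyGetD w L ""))
    else w
  let L' := L + 1
  let R' := R - 1
  if L' > R' then
    let i := pvBScan mirror w' 0
    if i = w'.length then (w', 0, m - 1)
    else (w', (i : Int), (w'.length : Int) - 1 - (i : Int))
  else (w', L', R')

-- cursor invariant maintained by the machine (word keeps length m, L in range, L + R = m - 1)
def pvInv (m : Int) (st : List String × Int × Int) : Prop :=
  (st.1.length : Int) = m ∧ 0 ≤ st.2.1 ∧ st.2.1 < m ∧ st.2.1 + st.2.2 = m - 1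

lemma pvFU_eq_scan (mirror : List (String × String)) (w : List String) (i : Nat) :
    pvFirstUnmatched w mirror i =
      (if pvBScan mirror w i < w.length then
        some ((pvBScan mirror w i : Int), (w.length : Int) - 1 - (pvBScan mirror w i : Int))
      else none) := by
  fun_induction pvBScan mirror w i with
  | case1 i h hne =>
    rw [pvFirstUnmatched, dif_pos h, if_pos hne, if_pos h]
  | case2 i h heq ih =>
    rw [pvFirstUnmatched, dif_pos h, if_neg heq, ih]
  | case3 i h =>
    rw [pvFirstUnmatched, dif_neg h, if_neg h]

lemma pvBScan_le (mirror : List (String × String)) (lst : List String) (i : Nat)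
    (hi : i ≤ lst.length) : pvBScan mirror lst i ≤ lst.length := by
  fun_induction pvBScan mirror lst i with
  | case1 i h hne => omega
  | case2 i h heq ih => exact ih (by omega)
  | case3 i h => omega

-- the matched branch of A's step is a no-op write
lemma pvMatched_set (w : List String) (L : Int) (v : String)
    (h0 : 0 ≤ L) (h1 : L < (w.length : Int))
    (hv : v = PySem.List.pyGetD w L "") : PySem.List.pySetD w L v = w := by
  rw [PySem.List.pySetD_of_nonneg w v h0, hv, PySem.List.pyGetD_eq_getElem w "" h0 h1]
  exact List.set_getElem_self (by omega)

lemma pvInv_step (mirror : List (String × String)) (m : Int) (w : List String) (L R : Int)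
    (hm : 0 < m) (hlen : (w.length : Int) = m) (hL0 : 0 ≤ L) (hLm : L < m)
    (hsum : L + R = m - 1) : pvInv m (pvStepF mirror m (w, L, R)) := by
  simp only [pvStepF]
  set w' := if (PySem.List.pyGetD w L "") ≠ pvMget mirror (PySem.List.pyGetD w R "")
    then PySem.List.pySetD w R (pvMget mirror (PySem.List.pyGetD w L ""))
    else w with hw'
  have hlen' : (w'.length : Int) = m := by
    rw [hw']; split_ifs with hc
    · rw [PySem.List.length_pySetD]; exact hlen
    · exact hlen
  by_cases hwrap : L + 1 > R - 1
  · rw [if_pos hwrap]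
    by_cases hall : pvBScan mirror w' 0 = w'.length
    · rw [if_pos hall]
      exact ⟨hlen', le_refl 0, hm, by dsimp only; omega⟩
    · rw [if_neg hall]
      have hle := pvBScan_le mirror w' 0 (Nat.zero_le _)
      have hlt : (pvBScan mirror w' 0 : Int) < (w'.length : Int) := by exact_mod_cast by omega
      exact ⟨hlen', by dsimp only; positivity, by dsimp only; omega, by dsimp only; omega⟩
  · rw [if_neg hwrap]
    exact ⟨hlen', by dsimp only; omega, by dsimp only; omega, by dsimp only; omega⟩

lemma pvALoop_eq (mirror : List (String × String)) (m : Int) (hm : 0 < m) :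
    ∀ (n : Nat) (w : List String) (L R : Int),
      (w.length : Int) = m → 0 ≤ L → L < m → L + R = m - 1 →
      pvALoop mirror m n w L R = ((pvStepF mirror m)^[n] (w, L, R)).1 := by
  intro n
  induction n with
  | zero => intro w L R _ _ _ _; simp [pvALoop]
  | succ n ih =>
    intro w L R hlen hL0 hLm hsum
    have hR0 : 0 ≤ R := by omega
    have hRm : R < (w.length : Int) := by omega
    rw [Function.iterate_succ_apply, pvALoop]
    have hinv' := pvInv_step mirror m w L R hm hlen hL0 hLm hsum
    simp only [pvStepF] at hinv' ⊢
    by_cases hc : (PySem.List.pyGetD w L "") ≠ pvMget mirror (PySem.List.pyGetD w R "")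
    · simp only [if_pos hc] at hinv' ⊢
      set w' := PySem.List.pySetD w R (pvMget mirror (PySem.List.pyGetD w L "")) with hw'
      have hlenw' : (w'.length : Int) = m := by rw [hw', PySem.List.length_pySetD]; exact hlen
      by_cases hwrap : L + 1 > R - 1
      · simp only [if_pos hwrap] at hinv' ⊢
        rw [pvFU_eq_scan]
        by_cases hall : pvBScan mirror w' 0 = w'.length
        · simp only [if_pos hall] at hinv' ⊢
          rw [if_neg (by omega)]
          exact ih w' 0 (m - 1) hlenw' le_rfl hm (by omega)
        · have hle := pvBScan_le mirror w' 0 (Nat.zero_le _)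
          simp only [if_neg hall] at hinv' ⊢

          obtain ⟨h1, h2, h3, h4⟩ := hinv'
          rw [if_pos (by omega)]
          exact ih w' _ _ hlenw' h2 h3 h4
      · simp only [if_neg hwrap] at hinv' ⊢

        obtain ⟨h1, h2, h3, h4⟩ := hinv'
        exact ih w' _ _ hlenw' h2 h3 h4
    · simp only [if_neg hc] at hinv' ⊢
      rw [pvMatched_set w L _ hL0 (by omega) (by push Not at hc; exact hc.symm)]
      by_cases hwrap : L + 1 > R - 1
      · simp only [if_pos hwrap] at hinv' ⊢
        rw [pvFU_eq_scan]
        by_cases hall : pvBScan mirror w 0 = w.length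
        · simp only [if_pos hall] at hinv' ⊢
          rw [if_neg (by omega)]
          exact ih w 0 (m - 1) hlen le_rfl hm (by omega)
        · have hle := pvBScan_le mirror w 0 (Nat.zero_le _)
          simp only [if_neg hall] at hinv' ⊢

          obtain ⟨h1, h2, h3, h4⟩ := hinv'
          rw [if_pos (by omega)]
          exact ih w _ _ hlen h2 h3 h4
      · simp only [if_neg hwrap] at hinv' ⊢

        obtain ⟨h1, h2, h3, h4⟩ := hinv'
        exact ih w _ _ hlen h2 h3 h4

lemma pvIterPeriod {α : Type} (f : α → α) (s : α) (i p : Nat) (hp : 0 < p)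
    (h : f^[i + p] s = f^[i] s) :
    ∀ n, i ≤ n → f^[n] s = f^[i + (n - i) % p] s := by
  intro n
  induction n using Nat.strong_induction_on with
  | _ n ihn =>
    intro hin
    by_cases hlt : n < i + p
    · have : (n - i) % p = n - i := Nat.mod_eq_of_lt (by omega)
      rw [this]; congr 1; omega
    · have hnp : i ≤ n - p := by omega
      have h1 : f^[n] s = f^[n - p] s := by
        have he : n = (n - i - p) + (i + p) := by omega
        rw [he, Function.iterate_add_apply, h, ← Function.iterate_add_apply]
        congr 1; omega
      rw [h1, ihn (n - p) (by omega) hnp]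
      congr 2
      have he2 : n - i = (n - p - i) + p := by omega
      rw [he2, Nat.add_mod_right]

-- B's edit computes the step function (first three components) …
lemma pvBEdit_eq (mirror : List (String × String)) (m : Int) (w : List String) (L R : Int)
    (hlen : (w.length : Int) = m) (hL0 : 0 ≤ L) (hLm : L < m) (hsum : L + R = m - 1) :
    ((pvBEdit mirror m w L R).1, (pvBEdit mirror m w L R).2.1, (pvBEdit mirror m w L R).2.2.1)
      = pvStepF mirror m (w, L, R) := by
  have hR0 : 0 ≤ R := by omega
  have hRm : R < (w.length : Int) := by omega
  simp only [pvBEdit, pvStepF]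
  by_cases hc : (PySem.List.pyGetD w L "") ≠ pvMget mirror (PySem.List.pyGetD w R "")
  · simp only [if_pos hc]
    by_cases hv : (PySem.List.pyGetD w R "") ≠ pvMget mirror (PySem.List.pyGetD w L "")
    · simp only [if_pos hv]
      split_ifs <;> rfl
    · simp only [if_neg hv]
      push Not at hv
      rw [show PySem.List.pySetD w R (pvMget mirror (PySem.List.pyGetD w L "")) = w from
        pvMatched_set w R _ hR0 hRm hv.symm]
      split_ifs <;> rfl
  · simp only [if_neg hc]
    split_ifs <;> rfl

-- … and leaves the word untouched when it reports no change
lemma pvBEdit_unchanged (mirror : List (String × String)) (m : Int) (w : List String) (L R : Int)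
    (h : (pvBEdit mirror m w L R).2.2.2 = false) : (pvBEdit mirror m w L R).1 = w := by
  simp only [pvBEdit] at h ⊢
  by_cases hc : (PySem.List.pyGetD w L "") ≠ pvMget mirror (PySem.List.pyGetD w R "")
  · simp only [if_pos hc] at h ⊢
    by_cases hv : (PySem.List.pyGetD w R "") ≠ pvMget mirror (PySem.List.pyGetD w L "")
    · simp only [if_pos hv] at h
      exact Bool.noConfusion h
    · simp only [if_neg hv]
  · simp only [if_neg hc]

lemma pvInv_iter (mirror : List (String × String)) (m : Int) (hm : 0 < m)
    (s0 : List String × Int × Int) (h0 : pvInv m s0) :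
    ∀ n : Nat, pvInv m ((pvStepF mirror m)^[n] s0) := by
  intro n
  induction n with
  | zero => exact h0
  | succ n ih =>
    rw [Function.iterate_succ_apply']
    exact pvInv_step mirror m ((pvStepF mirror m)^[n] s0).1 ((pvStepF mirror m)^[n] s0).2.1
      ((pvStepF mirror m)^[n] s0).2.2 hm ih.1 ih.2.1 ih.2.2.1 ih.2.2.2

lemma pvBReplay_eq (mirror : List (String × String)) (m : Int) (hm : 0 < m) :
    ∀ (r : Nat) (w : List String) (L R : Int),
      (w.length : Int) = m → 0 ≤ L → L < m → L + R = m - 1 →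
      pvBReplay mirror m r w L R = ((pvStepF mirror m)^[r] (w, L, R)).1 := by
  intro r
  induction r with
  | zero => intro w L R _ _ _ _; simp [pvBReplay]
  | succ r ih =>
    intro w L R hlen hL0 hLm hsum
    rw [Function.iterate_succ_apply, pvBReplay]
    have he := pvBEdit_eq mirror m w L R hlen hL0 hLm hsum
    have hinv' := pvInv_step mirror m w L R hm hlen hL0 hLm hsum
    rw [← he] at hinv'
    rw [ih _ _ _ hinv'.1 hinv'.2.1 hinv'.2.2.1 hinv'.2.2.2, ← he]

lemma pvBLoop_eq (mirror : List (String × String)) (m steps : Int) (hm : 0 < m)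
    (s0 : List String × Int × Int) (hinv0 : pvInv m s0) :
    ∀ (fuel kN tsN lastmodN : Nat) (limit : Int) (w : List String) (L R sL sR : Int),
      steps.toNat = kN + fuel →
      (w, L, R) = (pvStepF mirror m)^[kN] s0 →
      tsN ≤ kN →
      sL = ((pvStepF mirror m)^[tsN] s0).2.1 →
      sR = ((pvStepF mirror m)^[tsN] s0).2.2 →
      (∀ t : Nat, lastmodN ≤ t → t ≤ kN → ((pvStepF mirror m)^[t] s0).1 = w) →
      pvBLoop mirror m steps fuel (kN : Int) w L R sL sR (tsN : Int) limit (lastmodN : Int) =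
        PySem.Str.join "" (((pvStepF mirror m)^[steps.toNat] s0).1) := by
  intro fuel
  induction fuel with
  | zero =>
    intro kN tsN lastmodN limit w L R sL sR hfuel hcur _ _ _ _
    rw [pvBLoop]
    have hk : steps.toNat = kN := by omega
    rw [hk, ← hcur]
  | succ fuel ih =>
    intro kN tsN lastmodN limit w L R sL sR hfuel hcur hts hsL hsR hmod
    rw [pvBLoop]
    have hinvk := pvInv_iter mirror m hm s0 hinv0 kN
    rw [← hcur] at hinvk
    have he := pvBEdit_eq mirror m w L R hinvk.1 hinvk.2.1 hinvk.2.2.1 hinvk.2.2.2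
    have hnext : ((pvBEdit mirror m w L R).1, (pvBEdit mirror m w L R).2.1,
        (pvBEdit mirror m w L R).2.2.1) = (pvStepF mirror m)^[kN + 1] s0 := by
      rw [he, Function.iterate_succ_apply', ← hcur]
    set e := pvBEdit mirror m w L R with hedef
    -- the updated lastmod, as a natural number
    set lastmodN' : Nat := if e.2.2.2 then kN + 1 else lastmodN with hlm
    have hlmcast : (if e.2.2.2 = true then (kN : Int) + 1 else (lastmodN : Int)) =
        ((lastmodN' : Nat) : Int) := by
      rw [hlm]; cases e.2.2.2 <;> simp
    have hmod' : ∀ t : Nat, lastmodN' ≤ t → t ≤ kN + 1 → ((pvStepF mirror m)^[t] s0).1 = e.1 := by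
      intro t h1 h2
      rcases Nat.lt_or_ge t (kN + 1) with h3 | h3
      · cases hb : e.2.2.2 with
        | true => rw [hlm, if_pos hb] at h1; omega
        | false =>
          rw [pvBEdit_unchanged mirror m w L R hb]
          rw [hlm, if_neg (by simp [hb])] at h1
          exact hmod t h1 (by omega)
      · have : t = kN + 1 := by omega
        rw [this, ← hnext]
    rw [hlmcast]
    by_cases hdet : e.2.1 = sL ∧ e.2.2.1 = sR ∧ ((lastmodN' : Nat) : Int) ≤ (tsN : Int)
    · rw [if_pos hdet]
      obtain ⟨hd1, hd2, hd3⟩ := hdet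
      have hlmts : lastmodN' ≤ tsN := by exact_mod_cast hd3
      have hrepeat : (pvStepF mirror m)^[kN + 1] s0 = (pvStepF mirror m)^[tsN] s0 := by
        rw [← hnext]
        have hword : ((pvStepF mirror m)^[tsN] s0).1 = e.1 := hmod' tsN hlmts (by omega)
        have : (pvStepF mirror m)^[tsN] s0 =
            (((pvStepF mirror m)^[tsN] s0).1, ((pvStepF mirror m)^[tsN] s0).2.1,
              ((pvStepF mirror m)^[tsN] s0).2.2) := rfl
        rw [this, hword, ← hsL, ← hsR, hd1, hd2]
      have hp : 0 < kN + 1 - tsN := by omega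
      have hper : (pvStepF mirror m)^[tsN + (kN + 1 - tsN)] s0 = (pvStepF mirror m)^[tsN] s0 := by
        rw [show tsN + (kN + 1 - tsN) = kN + 1 by omega, hrepeat]
      have hmain := pvIterPeriod _ s0 tsN (kN + 1 - tsN) hp hper steps.toNat (by omega)
      have hc1 : (kN : Int) + 1 - (tsN : Int) = ((kN + 1 - tsN : Nat) : Int) := by omega
      have hc2 : steps - (tsN : Int) = ((steps.toNat - tsN : Nat) : Int) := by omega
      rw [hc1, hc2]
      show PySem.Str.join "" (pvBReplay mirror m
        (PySem.Int.mod ((steps.toNat - tsN : Nat) : Int) ((kN + 1 - tsN : Nat) : Int)).toNat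
        e.1 sL sR) = _
      rw [PySem.Int.mod_natCast, Int.toNat_natCast]
      have hst : (e.1, sL, sR) = (pvStepF mirror m)^[tsN] s0 := by
        rw [← hrepeat, ← hnext, hd1, hd2]
      have hinvts := pvInv_iter mirror m hm s0 hinv0 tsN
      rw [← hst] at hinvts
      rw [pvBReplay_eq mirror m hm _ _ _ _ hinvts.1 hinvts.2.1 hinvts.2.2.1 hinvts.2.2.2,
        hst, ← Function.iterate_add_apply, hmain, Nat.add_comm]
    · rw [if_neg hdet]
      have hk1 : (kN : Int) + 1 = ((kN + 1 : Nat) : Int) := by omega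
      by_cases hchk : (kN : Int) + 1 - (tsN : Int) = limit
      · rw [if_pos hchk, hk1]
        exact ih (kN + 1) (kN + 1) lastmodN' (2 * limit) e.1 e.2.1 e.2.2.1 e.2.1 e.2.2.1
          (by omega) (by rw [← hnext]) le_rfl (by rw [← hnext]) (by rw [← hnext]) hmod'
      · rw [if_neg hchk, hk1]
        exact ih (kN + 1) tsN lastmodN' limit e.1 e.2.1 e.2.2.1 sL sR
          (by omega) (by rw [← hnext]) (by omega) hsL hsR hmod'

-- ===== VERDICT (by name: the statement is the Claim_ definition above) =====
theorem run_pointer_machine_spec : Claim_equal_run_pointer_machine := by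
  intro w0 steps mirror _ hpre
  unfold Spec_run_pointer_machine
  simp only [run_pointer_machine, run_pointer_machine_alt]
  set w : List String := w0.toList.map (fun c => String.ofList [c]) with hw
  set m : Int := (w.length : Int) with hm
  rcases Nat.eq_zero_or_pos steps.toNat with h0 | hpos
  · rw [h0, pvALoop, pvBLoop]
  · have hsteps : 0 < steps := by
      rcases Int.lt_or_le 0 steps with h | h
      · exact h
      · exfalso; rw [Int.toNat_of_nonpos h] at hpos; omega
    have hne : w0.toList ≠ [] := by
      rcases hpre with h | h
      · exact h
      · omega
    have hwne : w ≠ [] := by rw [hw]; simpa using hne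
    have hm0 : 0 < m := by
      rw [hm]
      have : 0 < w.length := List.length_pos_iff.mpr hwne
      exact_mod_cast this
    have hinv0 : pvInv m (w, 0, m - 1) := ⟨rfl, le_rfl, hm0, by ring⟩
    have hB := pvBLoop_eq mirror m steps hm0 (w, 0, m - 1) hinv0 steps.toNat 0 0 0 1 w 0
      (m - 1) 0 (m - 1) (by omega) rfl le_rfl rfl rfl (fun t _ ht => by rw [Nat.le_zero.mp ht, Function.iterate_zero_apply])
    simp only [Nat.cast_zero] at hB
    rw [pvALoop_eq mirror m hm0 steps.toNat w 0 (m - 1) rfl le_rfl hm0 (by ring), hB]
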